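-- pv_equiv track=rewrite | github.com/yurii-piets/zaisd | lab3/run.py | build_frequency_dictionary
-- ===== SOURCE A (Python) =====
-- def build_frequency_dictionary(content):
--     frequency_dictionary = {}
--     current_index = 0
--     while current_index < len(content):
--         coding_word = content[current_index:current_index + CODING_LENGTH]
--         if coding_word not in frequency_dictionary.keys():
--             frequency_dictionary[coding_word] = 1
--         else:
--             frequency_dictionary[coding_word] += 1
--         current_index += CODING_LENGTH
--     return frequency_dictionary
--
-- CODING_LENGTH = 1
-- ===== SOURCE B (Python) =====
-- CODING_LENGTH = 1
--
-- def build_frequency_dictionary(content):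
--     # Count by deduplicating the coding words (length 1) and scanning once per
--     # distinct word, instead of incrementing a hash entry per position.
--     words = list(content)
--     return {w: words.count(w) for w in dict.fromkeys(words)}
-- ===== Notes on version B (the rewrite author's own statement) =====
-- stated objective: alternative
-- what changed: Replaces the positional while-loop that increments a dict entry per character with an ordered dedup of the characters followed by one count() scan per distinct character, built as a dict comprehension.
import Mathlib
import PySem

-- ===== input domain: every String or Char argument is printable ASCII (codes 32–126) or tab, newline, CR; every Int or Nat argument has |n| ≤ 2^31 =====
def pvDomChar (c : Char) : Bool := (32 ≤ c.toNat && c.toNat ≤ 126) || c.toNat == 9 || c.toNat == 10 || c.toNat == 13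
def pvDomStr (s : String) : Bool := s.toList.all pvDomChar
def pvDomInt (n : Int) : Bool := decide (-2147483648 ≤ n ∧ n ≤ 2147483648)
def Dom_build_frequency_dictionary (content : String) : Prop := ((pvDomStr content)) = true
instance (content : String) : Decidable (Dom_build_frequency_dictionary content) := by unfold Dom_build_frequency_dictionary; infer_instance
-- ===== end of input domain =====

-- B replaces A's per-position dict-increment loop with dedup + one count scan per
-- distinct character (alternative decomposition; not claimed faster).

-- ===== PORT A =====
-- while loop over current_index (step CODING_LENGTH = 1), slicing one coding word per step
def build_frequency_dictionary (content : String) : List (String × Int) :=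
  let cs := content.toList
  let d := (PySem.List.pyRange 0 (cs.length : Int) 1).foldl
    (fun d i =>
      let coding_word := String.mk (PySem.List.slice cs (some i) (some (i + 1)))
      if d.contains coding_word = false then d.insert coding_word 1
      else d.insert coding_word (d.getD coding_word 0 + 1))
    PySem.Dict.empty
  d.items

-- ===== PORT B =====
def build_frequency_dictionary_alt (content : String) : List (String × Int) :=
  let words := content.toList.map (fun c => String.mk [c])
  (PySem.List.dedup words).map (fun w => (w, (words.count w : Int)))

-- ===== PRECONDITION & SPEC =====
def Spec_build_frequency_dictionary (content : String) (out : List (String × Int)) : Prop := out = build_frequency_dictionary_alt content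
instance (content : String) (out : List (String × Int)) : Decidable (Spec_build_frequency_dictionary content out) := by unfold Spec_build_frequency_dictionary; infer_instance

-- ===== CLAIM (what is proved, stated in full; the proofs are below) =====
def Claim_equal_build_frequency_dictionary : Prop := ∀ (content : String), Dom_build_frequency_dictionary content → Spec_build_frequency_dictionary content (build_frequency_dictionary content)

-- ===== LEMMAS AND PROOFS =====

-- folding over positions j < cs.length with the one-element slice at j is folding over the words
lemma foldl_range_slice {β : Type} (cs : List Char) (f : β → String → β) (init : β) :
    (List.range cs.length).foldl
      (fun d j => f d (String.mk (List.take 1 (List.drop j cs)))) init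
    = (cs.map (fun c => String.mk [c])).foldl f init := by
  induction cs generalizing init with
  | nil => rfl
  | cons c t ih =>
    simp only [List.length_cons, List.range_succ_eq_map, List.foldl_cons, List.foldl_map,
      List.map_cons, List.drop_zero, List.drop_succ_cons, List.take_succ_cons, List.take_zero]
    simpa only [List.foldl_map] using ih (f init (String.mk [c]))

theorem build_frequency_dictionary_spec : Claim_equal_build_frequency_dictionary := by
  intro content _
  show _ = _
  unfold build_frequency_dictionary build_frequency_dictionary_alt
  set cs := content.toList with hcs
  simp only [PySem.List.pyRange_zero_natCast, List.foldl_map]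
  have hslice : ∀ j : Nat, PySem.List.slice cs (some (j : Int)) (some ((j : Int) + 1))
      = List.take 1 (List.drop j cs) := by
    intro j
    have := PySem.List.slice_natCast_add cs j 1
    simpa using this
  simp only [hslice]
  have h1 := foldl_range_slice cs
      (fun d coding_word =>
        if d.contains coding_word = false then d.insert coding_word 1
        else d.insert coding_word (d.getD coding_word 0 + 1))
      (PySem.Dict.empty (κ := String) (ν := Int))
  beta_reduce at h1
  rw [h1]
  have h2 := PySem.List.foldl_congr_mem (cs.map (fun c => String.mk [c]))
      (fun d w =>
        if d.contains w = false then d.insert w 1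
        else d.insert w (d.getD w 0 + 1))
      (fun d w => d.insert w (d.getD w 0 + 1))
      (PySem.Dict.empty (κ := String) (ν := Int))
      (by
        intro acc w _
        by_cases h : acc.contains w = false
        · simp [h, PySem.Dict.getD_of_not_contains acc 0 h]
        · simp [h])
  beta_reduce at h2
  rw [h2, PySem.Dict.foldl_insert_getD_add_one_eq_counter, PySem.Dict.items_counter]
  rfl
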